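-- pv_equiv track=rewrite | github.com/zeinablouati/damier_fuzzy | src/circuit.py | _collect_dirs
-- ===== SOURCE A (Python) =====
-- from collections import defaultdict
--
-- DIR_VECTORS = {
--     'N':  ( 0, -1), 'S':  ( 0,  1),
--     'E':  ( 1,  0), 'W':  (-1,  0),
--     'NE': ( 1, -1), 'SE': ( 1,  1),
--     'SW': (-1,  1), 'NW': (-1, -1),
-- }
--
-- def _collect_dirs(path, closed=False):
--     """
--     Calcule pour chaque case ses directions de sortie.
--     Supporte H, V et diagonales (dc=±1, dr=±1).
--     """
--     dirs = defaultdict(set)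
--     n = len(path)
--
--     # Table inverse dc,dr → nom de direction
--     inv = {v: k for k, v in DIR_VECTORS.items()}
--
--     for i, (c, r) in enumerate(path):
--         nbrs = []
--         if closed:
--             nbrs = [path[(i-1)%n], path[(i+1)%n]]
--         else:
--             if i > 0:     nbrs.append(path[i-1])
--             if i < n-1:   nbrs.append(path[i+1])
--
--         for nc, nr in nbrs:
--             dc, dr = nc - c, nr - r
--             # Normaliser pour les diagonales (dc,dr peut être ±1,±1)
--             # (pour les segments droits dc ou dr = 0)
--             key = (dc, dr)
--             if key in inv:
--                 dirs[(c, r)].add(inv[key])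
--
--     return dirs
-- ===== SOURCE B (Python) =====
-- from collections import defaultdict
--
-- DIR_VECTORS = {
--     'N':  ( 0, -1), 'S':  ( 0,  1),
--     'E':  ( 1,  0), 'W':  (-1,  0),
--     'NE': ( 1, -1), 'SE': ( 1,  1),
--     'SW': (-1,  1), 'NW': (-1, -1),
-- }
--
-- # opposite direction of each direction name
-- OPP = {'N': 'S', 'S': 'N', 'E': 'W', 'W': 'E',
--        'NE': 'SW', 'SW': 'NE', 'SE': 'NW', 'NW': 'SE'}
--
-- def _collect_dirs(path, closed=False):
--     """Label each edge once, then give every cell the labels of its two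
--     adjacent edges (incoming edge reversed via OPP)."""
--     dirs = defaultdict(set)
--     n = len(path)
--     inv = {v: k for k, v in DIR_VECTORS.items()}
--
--     if closed:
--         edges = [(path[(i+1) % n][0] - path[i][0],
--                   path[(i+1) % n][1] - path[i][1]) for i in range(n)]
--     else:
--         edges = [(path[i+1][0] - path[i][0],
--                   path[i+1][1] - path[i][1]) for i in range(n-1)]
--     labels = [inv.get(v) for v in edges]
--
--     for i, p in enumerate(path):
--         inc = labels[(i-1) % n] if closed else (labels[i-1] if i > 0 else None)
--         out = labels[i] if (closed or i < n-1) else None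
--         if inc is not None:
--             dirs[p].add(OPP[inc])
--         if out is not None:
--             dirs[p].add(out)
--     return dirs
-- ===== Notes on version B (the rewrite author's own statement) =====
-- stated objective: alternative
-- what changed: B classifies each edge of the path once into a direction label and then assembles every cell's exit set from its two adjacent edge labels (the incoming one flipped through an opposite-direction table), instead of recomputing both neighbour deltas and inverse-table lookups per node as A does.
import Mathlib
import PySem

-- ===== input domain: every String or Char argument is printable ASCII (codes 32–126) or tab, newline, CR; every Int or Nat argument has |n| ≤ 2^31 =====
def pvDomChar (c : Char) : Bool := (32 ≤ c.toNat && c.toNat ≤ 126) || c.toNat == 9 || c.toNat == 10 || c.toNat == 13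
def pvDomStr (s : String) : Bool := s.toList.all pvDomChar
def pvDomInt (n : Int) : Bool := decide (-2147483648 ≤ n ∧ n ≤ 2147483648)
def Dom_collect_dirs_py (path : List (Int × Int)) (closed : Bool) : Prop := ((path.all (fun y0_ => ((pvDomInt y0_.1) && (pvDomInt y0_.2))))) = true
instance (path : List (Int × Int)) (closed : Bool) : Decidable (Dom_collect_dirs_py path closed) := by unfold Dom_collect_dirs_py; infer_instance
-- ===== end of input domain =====

-- B labels each edge of the path once and then assembles every cell's exit set from its
-- two adjacent edge labels (incoming label reversed via an opposite-direction table),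
-- instead of re-deriving both neighbour deltas per node; objective: alternative decomposition.

-- ===== PORT A =====
def pvDIR_VECTORS : PySem.Dict String (Int × Int) :=
  PySem.Dict.ofList [("N",(0,-1)),("S",(0,1)),("E",(1,0)),("W",(-1,0)),
                     ("NE",(1,-1)),("SE",(1,1)),("SW",(-1,1)),("NW",(-1,-1))]

-- inv = {v: k for k, v in DIR_VECTORS.items()} (same comprehension in A and B)
def pvInv : PySem.Dict (Int × Int) String :=
  PySem.Dict.ofList (pvDIR_VECTORS.items.map (fun kv => (kv.2, kv.1)))

def collect_dirs_py (path : List (Int × Int)) (closed : Bool) : List (Int × Int × List String) :=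
  let n : Int := path.length
  let inv := pvInv
  let dirs : PySem.Dict (Int × Int) (PySem.Set String) :=
    (PySem.List.enumerate path).foldl (fun dirs ip =>
      let i := ip.1
      let c := ip.2.1
      let r := ip.2.2
      let nbrs : List (Int × Int) :=
        if closed then
          [PySem.List.pyGetD path (PySem.Int.mod (i-1) n) (0,0),
           PySem.List.pyGetD path (PySem.Int.mod (i+1) n) (0,0)]
        else
          (if i > 0 then [PySem.List.pyGetD path (i-1) (0,0)] else []) ++
          (if i < n-1 then [PySem.List.pyGetD path (i+1) (0,0)] else [])
      nbrs.foldl (fun dirs nb =>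
        let key : Int × Int := (nb.1 - c, nb.2 - r)
        if inv.contains key then
          dirs.modify (c, r) PySem.Set.empty (fun s => PySem.Set.add s ((inv.get? key).getD ""))
        else dirs) dirs) PySem.Dict.empty
  dirs.items.map (fun kv => (kv.1.1, kv.1.2, kv.2))

-- ===== PORT B =====
def pvOPP : PySem.Dict String String :=
  PySem.Dict.ofList [("N","S"),("S","N"),("E","W"),("W","E"),
                     ("NE","SW"),("SW","NE"),("SE","NW"),("NW","SE")]

def collect_dirs_py_alt (path : List (Int × Int)) (closed : Bool) : List (Int × Int × List String) :=
  let n : Int := path.length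
  let inv := pvInv
  let edges : List (Int × Int) :=
    if closed then
      (PySem.List.pyRange 0 n 1).map (fun i =>
        let a := PySem.List.pyGetD path i ((0:Int),(0:Int))
        let b := PySem.List.pyGetD path (PySem.Int.mod (i+1) n) ((0:Int),(0:Int))
        (b.1 - a.1, b.2 - a.2))
    else
      (PySem.List.pyRange 0 (n-1) 1).map (fun i =>
        let a := PySem.List.pyGetD path i ((0:Int),(0:Int))
        let b := PySem.List.pyGetD path (i+1) ((0:Int),(0:Int))
        (b.1 - a.1, b.2 - a.2))
  let labels : List (Option String) := edges.map (fun v => inv.get? v)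
  let dirs : PySem.Dict (Int × Int) (PySem.Set String) :=
    (PySem.List.enumerate path).foldl (fun dirs ip =>
      let i := ip.1
      let p := ip.2
      let inc : Option String :=
        if closed then PySem.List.pyGetD labels (PySem.Int.mod (i-1) n) none
        else if i > 0 then PySem.List.pyGetD labels (i-1) none else none
      let out : Option String :=
        if closed || decide (i < n-1) then PySem.List.pyGetD labels i none else none
      let dirs1 := match inc with
        | some s => dirs.modify p PySem.Set.empty (fun st => PySem.Set.add st (pvOPP.getD s ""))
        | none => dirs
      match out with
        | some s => dirs1.modify p PySem.Set.empty (fun st => PySem.Set.add st s)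
        | none => dirs1) PySem.Dict.empty
  dirs.items.map (fun kv => (kv.1.1, kv.1.2, kv.2))

-- ===== PRECONDITION & SPEC =====
def Spec_collect_dirs_py (path : List (Int × Int)) (closed : Bool) (out : List (Int × Int × List String)) : Prop := out = collect_dirs_py_alt path closed
instance (path : List (Int × Int)) (closed : Bool) (out : List (Int × Int × List String)) : Decidable (Spec_collect_dirs_py path closed out) := by unfold Spec_collect_dirs_py; infer_instance

-- ===== CLAIM (what is proved, stated in full; the proofs are below) =====
def Claim_equal_collect_dirs_py : Prop := ∀ (path : List (Int × Int)) (closed : Bool), Dom_collect_dirs_py path closed → Spec_collect_dirs_py path closed (collect_dirs_py path closed)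

-- ===== LEMMAS AND PROOFS =====

lemma pvInv_eq : pvInv = ⟨[((0,-1),"N"),((0,1),"S"),((1,0),"E"),((-1,0),"W"),
      ((1,-1),"NE"),((1,1),"SE"),((-1,1),"SW"),((-1,-1),"NW")]⟩ := by decide

lemma pvInv_get_none (a b : Int)
    (h : ¬((a = -1 ∨ a = 0 ∨ a = 1) ∧ (b = -1 ∨ b = 0 ∨ b = 1))) :
    pvInv.get? (a, b) = none := by
  rw [pvInv_eq]
  simp only [PySem.Dict.get?_mk_cons, beq_iff_eq, Prod.ext_iff]
  split_ifs <;> first | rfl | omega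

-- looking up the opposite vector in inv = applying OPP to the original lookup
lemma pvInv_neg (a b : Int) :
    pvInv.get? (a, b) = (pvInv.get? (-a, -b)).map (fun s => pvOPP.getD s "") := by
  by_cases h : (a = -1 ∨ a = 0 ∨ a = 1) ∧ (b = -1 ∨ b = 0 ∨ b = 1)
  · obtain ⟨ha, hb⟩ := h
    rcases ha with rfl | rfl | rfl <;> rcases hb with rfl | rfl | rfl <;> decide
  · rw [pvInv_get_none a b h, pvInv_get_none (-a) (-b) (by omega)]
    rfl

-- membership in enumerate xs s
lemma pv_mem_enumerate {α : Type} (xs : List α) (s : Int) (ip : Int × α)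
    (h : ip ∈ PySem.List.enumerate xs s) :
    ∃ k : Nat, k < xs.length ∧ ip.1 = s + k ∧ xs[k]? = some ip.2 := by
  induction xs generalizing s with
  | nil => simp [PySem.List.enumerate] at h
  | cons x xs ih =>
    rw [PySem.List.enumerate_cons] at h
    rcases List.mem_cons.mp h with h | h
    · exact ⟨0, by simp [h]⟩
    · obtain ⟨k, hk, h1, h2⟩ := ih (s+1) h
      exact ⟨k+1, by simpa using hk, by push_cast; omega, by simpa using h2⟩

-- ===== VERDICT (by name: the statement is the Claim_ definition above) =====
theorem collect_dirs_py_spec : Claim_equal_collect_dirs_py := by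
  intro path closed _
  unfold Spec_collect_dirs_py collect_dirs_py collect_dirs_py_alt
  simp only []
  congr 2
  apply PySem.List.foldl_congr_mem
  intro d ip hip
  obtain ⟨k, hk, hi, hx⟩ := pv_mem_enumerate path 0 ip hip
  obtain ⟨i, x⟩ := ip
  simp only at hi hx
  rw [zero_add] at hi
  subst hi
  have hxg : PySem.List.pyGetD path ((k : Int)) ((0:Int),(0:Int)) = x := by
    rw [PySem.List.pyGetD_natCast]
    simp [List.getD, hx]
  cases closed with
  | false =>
    simp only [Bool.false_eq_true, if_false, List.map_map, Bool.false_or,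
      decide_eq_true_eq, gt_iff_lt]
    by_cases h0 : (0:Int) < (k:Int)
    · by_cases h1 : (k:Int) < (path.length:Int) - 1
      · rw [if_pos h0, if_pos h1, if_pos h1]
        rw [PySem.List.pyGetD_map_pyRange_of_nonneg _ _ _ _ (by omega) (by omega),
            PySem.List.pyGetD_map_pyRange_of_nonneg _ _ _ _ (by omega) (by omega)]
        simp only [Function.comp_apply, show (k:Int) - 1 + 1 = (k:Int) from by ring, hxg]
        have hrw := pvInv_neg ((PySem.List.pyGetD path ((k:Int) - 1) (0,0)).1 - x.1)
          ((PySem.List.pyGetD path ((k:Int) - 1) (0,0)).2 - x.2)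
        rw [neg_sub, neg_sub] at hrw
        rcases hinc : pvInv.get? (x.1 - (PySem.List.pyGetD path ((k:Int) - 1) (0,0)).1,
            x.2 - (PySem.List.pyGetD path ((k:Int) - 1) (0,0)).2) with _ | s1 <;>
          rcases hout : pvInv.get? ((PySem.List.pyGetD path ((k:Int) + 1) (0,0)).1 - x.1,
            (PySem.List.pyGetD path ((k:Int) + 1) (0,0)).2 - x.2) with _ | s2 <;>
          simp [List.foldl, PySem.Dict.contains_eq_isSome_get?, hrw, hinc, hout,
            show 0 < k from by exact_mod_cast h0]
      · rw [if_pos h0, if_neg h1, if_neg h1]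
        rw [PySem.List.pyGetD_map_pyRange_of_nonneg _ _ _ _ (by omega) (by omega)]
        simp only [Function.comp_apply, show (k:Int) - 1 + 1 = (k:Int) from by ring, hxg]
        have hrw := pvInv_neg ((PySem.List.pyGetD path ((k:Int) - 1) (0,0)).1 - x.1)
          ((PySem.List.pyGetD path ((k:Int) - 1) (0,0)).2 - x.2)
        rw [neg_sub, neg_sub] at hrw
        rcases hinc : pvInv.get? (x.1 - (PySem.List.pyGetD path ((k:Int) - 1) (0,0)).1,
            x.2 - (PySem.List.pyGetD path ((k:Int) - 1) (0,0)).2) with _ | s1 <;>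
          simp [List.foldl, PySem.Dict.contains_eq_isSome_get?, hrw, hinc,
            show 0 < k from by exact_mod_cast h0]
    · rw [if_neg h0, if_neg h0]
      have hk0 : k = 0 := by omega
      by_cases h1 : (k:Int) < (path.length:Int) - 1
      · rw [if_pos h1, if_pos h1]
        rw [PySem.List.pyGetD_map_pyRange_of_nonneg _ _ _ _ (by omega) (by omega)]
        simp only [Function.comp_apply, hxg]
        rcases hout : pvInv.get? ((PySem.List.pyGetD path ((k:Int) + 1) (0,0)).1 - x.1,
            (PySem.List.pyGetD path ((k:Int) + 1) (0,0)).2 - x.2) with _ | s2 <;>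
          simp [List.foldl, PySem.Dict.contains_eq_isSome_get?, hout]
      · rw [if_neg h1, if_neg h1]
        simp
  | true =>
    have hn : (0:Int) < (path.length:Int) := by exact_mod_cast Nat.pos_of_ne_zero (by omega)
    simp only [List.map_map, Bool.true_or, reduceIte, PySem.Int.mod_eq_emod_of_pos hn]
    have harith : (((k:Int) - 1) % (path.length:Int) + 1) % (path.length:Int) = (k:Int) := by
      rw [Int.emod_add_emod, show (k:Int) - 1 + 1 = (k:Int) from by ring]
      exact Int.emod_eq_of_lt (by positivity) (by exact_mod_cast hk)
    rw [PySem.List.pyGetD_map_pyRange_of_nonneg _ _ _ _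
        (Int.emod_nonneg _ (by omega)) (Int.emod_lt_of_pos _ hn),
      PySem.List.pyGetD_map_pyRange_of_nonneg _ _ _ _ (by positivity) (by exact_mod_cast hk)]
    simp only [Function.comp_apply, harith, hxg]
    have hrw := pvInv_neg
      ((PySem.List.pyGetD path (((k:Int) - 1) % (path.length:Int)) (0,0)).1 - x.1)
      ((PySem.List.pyGetD path (((k:Int) - 1) % (path.length:Int)) (0,0)).2 - x.2)
    rw [neg_sub, neg_sub] at hrw
    rcases hinc : pvInv.get? (x.1 - (PySem.List.pyGetD path (((k:Int) - 1) % (path.length:Int)) (0,0)).1,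
        x.2 - (PySem.List.pyGetD path (((k:Int) - 1) % (path.length:Int)) (0,0)).2) with _ | s1 <;>
      rcases hout : pvInv.get? ((PySem.List.pyGetD path (((k:Int) + 1) % (path.length:Int)) (0,0)).1 - x.1,
          (PySem.List.pyGetD path (((k:Int) + 1) % (path.length:Int)) (0,0)).2 - x.2) with _ | s2 <;>
      simp [List.foldl, PySem.Dict.contains_eq_isSome_get?, hrw, hinc, hout]
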